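-- pv_equiv track=rewrite | github.com/nvolenec/crypt_tools | monoalpha_sub_solver.py | word_profile
-- ===== SOURCE A (Python) =====
-- def word_profile( word ):
--     seen = []
--     new_word = ''
--     counter = 1
--     for l in word:
--         if l in seen:
--             new_word += str(seen.index(l)+1)
--         else:
--             new_word += str(counter)
--             seen.append(l)
--             counter += 1
--     return new_word
-- ===== SOURCE B (Python) =====
-- def word_profile(word):
--     # Stage 1: first-occurrence position of each letter.
--     first = {}
--     for i, l in enumerate(word):
--         if l not in first:
--             first[l] = i
--     # Stage 2: rank of a letter = sorted position of its first-occurrence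
--     # index among all first-occurrence indices (1-based).  Sorting the first
--     # indices recovers the order of first appearance.
--     order = sorted(first.values())
--     pos = {}
--     for r, i in enumerate(order):
--         pos[i] = r + 1
--     # Stage 3: emit.
--     return ''.join(str(pos[first[l]]) for l in word)
-- ===== Notes on version B (the rewrite author's own statement) =====
-- stated objective: alternative
-- what changed: replaces A's incremental emit loop that scans its list of previously seen letters per character (membership test + list.index) by three staged passes: a first-occurrence-index map, ranks obtained by sorting those first indices, then a single emit pass via joined lookups
import Mathlib
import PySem

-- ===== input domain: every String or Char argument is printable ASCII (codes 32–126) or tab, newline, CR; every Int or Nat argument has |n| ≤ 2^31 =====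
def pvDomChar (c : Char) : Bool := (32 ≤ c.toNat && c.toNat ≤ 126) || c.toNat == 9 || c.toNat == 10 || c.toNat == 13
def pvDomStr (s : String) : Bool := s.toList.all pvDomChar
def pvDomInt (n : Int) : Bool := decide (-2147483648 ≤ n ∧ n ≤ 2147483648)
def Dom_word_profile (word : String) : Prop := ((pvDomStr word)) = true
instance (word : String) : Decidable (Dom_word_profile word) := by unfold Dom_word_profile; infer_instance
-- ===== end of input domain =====

-- B replaces A's per-character scans of the seen-letters list by three staged passes
-- (first-occurrence map, ranks by sorting the first indices, one emit pass); equal return values proved below.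

-- ===== PORT A =====
-- state: (seen, new_word as List Char, counter)
def wpStepA (st : List Char × List Char × Int) (l : Char) : List Char × List Char × Int :=
  match st with
  | (seen, nw, counter) =>
    if l ∈ seen then
      (seen, nw ++ PySem.Int.toChars ((((PySem.List.index? seen l).getD 0 : Int)) + 1), counter)
    else
      (seen ++ [l], nw ++ PySem.Int.toChars counter, counter + 1)

def word_profile (word : String) : String :=
  String.ofList (word.toList.foldl wpStepA ([], [], 1)).2.1

-- ===== PORT B =====
-- stage 1: first-occurrence index of each letter (for i, l in enumerate(word): if l not in first: first[l] = i)
def wpFirstStep (d : PySem.Dict Char Int) (p : Int × Char) : PySem.Dict Char Int :=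
  if d.contains p.2 = false then d.insert p.2 p.1 else d

-- stage 2 loop body: for r, i in enumerate(order): pos[i] = r + 1
def wpPosStep (d : PySem.Dict Int Int) (p : Int × Int) : PySem.Dict Int Int :=
  d.insert p.2 (p.1 + 1)

def word_profile_alt (word : String) : String :=
  let first := (PySem.List.enumerate word.toList 0).foldl wpFirstStep PySem.Dict.empty
  let order := PySem.List.sorted first.values (fun x => x) false
  let pos := (PySem.List.enumerate order 0).foldl wpPosStep PySem.Dict.empty
  PySem.Str.join "" (word.toList.map (fun l => PySem.Int.toStr (pos.getD (first.getD l 0) 0)))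

-- ===== PRECONDITION & SPEC =====
def Spec_word_profile (word : String) (out : String) : Prop := out = word_profile_alt word
instance (word : String) (out : String) : Decidable (Spec_word_profile word out) := by unfold Spec_word_profile; infer_instance

-- ===== CLAIM (what is proved, stated in full; the proofs are below) =====
def Claim_equal_word_profile : Prop := ∀ (word : String), Dom_word_profile word → Spec_word_profile word (word_profile word)

-- ===== LEMMAS AND PROOFS =====

-- canonical order of first appearance
def seenF (ks : List Char) (cs : List Char) : List Char :=
  cs.foldl (fun s l => if l ∈ s then s else s ++ [l]) ks

-- items appended to the first-occurrence dict by the stage-1 loop, starting at index i with keys ks already present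
def firstPairs (cs : List Char) (i : Int) (ks : List Char) : List (Char × Int) :=
  match cs with
  | [] => []
  | l :: cs => if l ∈ ks then firstPairs cs (i + 1) ks else (l, i) :: firstPairs cs (i + 1) (ks ++ [l])

lemma seenF_cons (ks : List Char) (l : Char) (cs : List Char) :
    seenF ks (l :: cs) = seenF (if l ∈ ks then ks else ks ++ [l]) cs := by
  simp only [seenF, List.foldl_cons]

lemma seenF_prefix (cs ks : List Char) : ∃ t, seenF ks cs = ks ++ t := by
  induction cs generalizing ks with
  | nil => exact ⟨[], by simp [seenF]⟩
  | cons l cs ih =>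
    rw [seenF_cons]
    by_cases h : l ∈ ks
    · simpa [h] using ih ks
    · obtain ⟨t, ht⟩ := ih (ks ++ [l])
      exact ⟨l :: t, by simp [h, ht]⟩

lemma mem_seenF (cs ks : List Char) (x : Char) : x ∈ seenF ks cs ↔ x ∈ ks ∨ x ∈ cs := by
  induction cs generalizing ks with
  | nil => simp [seenF]
  | cons l cs ih =>
    rw [seenF_cons]
    by_cases h : l ∈ ks
    · simp only [h, if_true, ih]
      constructor
      · rintro (hx | hx) <;> simp [hx]
      · rintro (hx | hx)
        · exact Or.inl hx
        · rcases List.mem_cons.mp hx with rfl | hx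
          · exact Or.inl h
          · exact Or.inr hx
    · simp only [h, if_false, ih]
      constructor
      · rintro (hx | hx)
        · rcases List.mem_append.mp hx with hx | hx
          · exact Or.inl hx
          · simp at hx; simp [hx]
        · simp [hx]
      · rintro (hx | hx)
        · exact Or.inl (by simp [hx])
        · rcases List.mem_cons.mp hx with rfl | hx
          · exact Or.inl (by simp)
          · exact Or.inr hx

lemma seenF_nodup (cs ks : List Char) (h : ks.Nodup) : (seenF ks cs).Nodup := by
  induction cs generalizing ks with
  | nil => simpa [seenF]
  | cons l cs ih =>
    rw [seenF_cons]
    by_cases hm : l ∈ ks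
    · simpa [hm] using ih ks h
    · rw [if_neg hm]; refine ih (ks ++ [l]) ?_
      rw [List.nodup_append]
      exact ⟨h, by simp, by intro a ha b hb; simp at hb; subst hb; exact fun e => hm (e ▸ ha)⟩

-- ===== A side =====

lemma A_canon (cs seen nw : List Char) (counter : Int)
    (hnd : seen.Nodup) (hc : counter = (seen.length : Int) + 1) :
    (cs.foldl wpStepA (seen, nw, counter)).2.1 =
      nw ++ (cs.map (fun l =>
        PySem.Int.toChars (((PySem.List.index? (seenF seen cs) l).getD 0 : Int) + 1))).flatten := by
  induction cs generalizing seen nw counter with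
  | nil => simp
  | cons l cs ih =>
    simp only [List.foldl_cons, List.map_cons, List.flatten_cons]
    by_cases hm : l ∈ seen
    · have hstep : wpStepA (seen, nw, counter) l
          = (seen, nw ++ PySem.Int.toChars (((PySem.List.index? seen l).getD 0 : Int) + 1), counter) := by
        simp [wpStepA, hm]
      have hord : seenF seen (l :: cs) = seenF seen cs := by rw [seenF_cons]; simp [hm]
      obtain ⟨t, ht⟩ := seenF_prefix cs seen
      have hidx : PySem.List.index? (seenF seen cs) l = PySem.List.index? seen l := by
        rw [ht, PySem.List.index?_append_of_mem t hm]
      rw [hstep, ih seen _ counter hnd hc, hord, hidx]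
      simp [List.append_assoc]
    · have hstep : wpStepA (seen, nw, counter) l
          = (seen ++ [l], nw ++ PySem.Int.toChars counter, counter + 1) := by
        simp [wpStepA, hm]
      have hord : seenF seen (l :: cs) = seenF (seen ++ [l]) cs := by
        rw [seenF_cons]; simp [hm]
      obtain ⟨t, ht⟩ := seenF_prefix cs (seen ++ [l])
      have hidx : PySem.List.index? (seenF (seen ++ [l]) cs) l = some seen.length := by
        rw [ht, PySem.List.index?_append_of_mem t (by simp : l ∈ seen ++ [l]),
          PySem.List.index?_append_singleton_self seen l hm]
      rw [hstep, ih (seen ++ [l]) _ (counter + 1)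
        (by rw [List.nodup_append]; exact ⟨hnd, by simp, by intro a ha b hb; simp at hb; subst hb; exact fun e => hm (e ▸ ha)⟩)
        (by simp [hc]), hord, hidx]
      simp only [hc, Option.getD_some]
      simp [List.append_assoc]

-- ===== B side =====

lemma foldFirst_items (cs : List Char) (i : Int) (d : PySem.Dict Char Int)
    (hnd : d.keys.Nodup) :
    ((PySem.List.enumerate cs i).foldl wpFirstStep d).items = d.items ++ firstPairs cs i d.keys := by
  induction cs generalizing i d with
  | nil => simp [firstPairs]
  | cons l cs ih =>
    rw [PySem.List.enumerate_cons, List.foldl_cons]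
    by_cases h : l ∈ d.keys
    · have hc : d.contains l = true := (PySem.Dict.contains_iff_mem_keys d l).mpr h
      have hstep : wpFirstStep d (i, l) = d := by simp [wpFirstStep, hc]
      rw [hstep, ih (i + 1) d hnd]
      simp [firstPairs, h]
    · have hc : d.contains l = false := by
        cases hcl : d.contains l
        · rfl
        · exact absurd ((PySem.Dict.contains_iff_mem_keys d l).mp hcl) h
      have hstep : wpFirstStep d (i, l) = d.insert l i := by simp [wpFirstStep, hc]
      have hkeys : (d.insert l i).keys = d.keys ++ [l] :=
        PySem.Dict.keys_insert_of_not_contains d i hc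
      have hnd' : (d.insert l i).keys.Nodup := by
        rw [hkeys, List.nodup_append]
        exact ⟨hnd, by simp, by intro a ha b hb; simp at hb; subst hb; exact fun e => h (e ▸ ha)⟩
      rw [hstep, ih (i + 1) _ hnd', PySem.Dict.items_insert_of_not_contains d i hc, hkeys]
      simp [firstPairs, h]

lemma firstPairs_fst (cs : List Char) (i : Int) (ks : List Char) :
    ks ++ (firstPairs cs i ks).map Prod.fst = seenF ks cs := by
  induction cs generalizing i ks with
  | nil => simp [firstPairs, seenF]
  | cons l cs ih =>
    rw [seenF_cons]
    by_cases h : l ∈ ks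
    · simpa [firstPairs, h] using ih (i + 1) ks
    · simp only [firstPairs, h, if_false, List.map_cons]
      rw [← ih (i + 1) (ks ++ [l])]
      simp

lemma firstPairs_snd_lt (cs : List Char) (i : Int) (ks : List Char) :
    ∀ p ∈ firstPairs cs i ks, i ≤ p.2 := by
  induction cs generalizing i ks with
  | nil => simp [firstPairs]
  | cons l cs ih =>
    intro p hp
    by_cases h : l ∈ ks
    · simp only [firstPairs, h, if_true] at hp
      have := ih (i + 1) ks p hp; omega
    · simp only [firstPairs, h, if_false, List.mem_cons] at hp
      rcases hp with rfl | hp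
      · simp
      · have := ih (i + 1) (ks ++ [l]) p hp; omega

lemma firstPairs_pairwise (cs : List Char) (i : Int) (ks : List Char) :
    (firstPairs cs i ks).Pairwise (fun a b => a.2 < b.2) := by
  induction cs generalizing i ks with
  | nil => simp [firstPairs]
  | cons l cs ih =>
    by_cases h : l ∈ ks
    · simpa [firstPairs, h] using ih (i + 1) ks
    · simp only [firstPairs, h, if_false]
      refine List.Pairwise.cons ?_ (ih (i + 1) (ks ++ [l]))
      intro p hp
      have := firstPairs_snd_lt cs (i + 1) (ks ++ [l]) p hp
      simp; omega

lemma join_nil_eq_flatten (l : List (List Char)) :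
    PySem.Chars.join [] l = l.flatten := by
  induction l with
  | nil => simp [PySem.Chars.join_nil]
  | cons a t ih =>
    cases t with
    | nil => simp [PySem.Chars.join_singleton]
    | cons b r => simp [PySem.Chars.join_cons_cons] at ih ⊢; simpa using ih

set_option maxHeartbeats 1000000 in
lemma B_canon (word : String) :
    (word_profile_alt word).toList =
      (word.toList.map (fun l =>
        PySem.Int.toChars (((PySem.List.index? (seenF [] word.toList) l).getD 0 : Int) + 1))).flatten := by
  have hunf : word_profile_alt word = PySem.Str.join "" (word.toList.map (fun l =>
      PySem.Int.toStr (((PySem.List.enumerate (PySem.List.sorted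
          ((PySem.List.enumerate word.toList 0).foldl wpFirstStep PySem.Dict.empty).values
          (fun x => x) false) 0).foldl wpPosStep PySem.Dict.empty).getD
        (((PySem.List.enumerate word.toList 0).foldl wpFirstStep PySem.Dict.empty).getD l 0) 0))) := rfl
  rw [hunf]
  have hitems : ((PySem.List.enumerate word.toList 0).foldl wpFirstStep PySem.Dict.empty).items
      = firstPairs word.toList 0 [] := by
    rw [foldFirst_items word.toList 0 PySem.Dict.empty (by simp)]
    rfl
  set first := (PySem.List.enumerate word.toList 0).foldl wpFirstStep PySem.Dict.empty with hfirst
  set P := firstPairs word.toList 0 [] with hP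
  have hkeys : first.keys = P.map Prod.fst := by
    simp only [PySem.Dict.keys, hitems]
  have hvalues : first.values = P.map Prod.snd := by
    simp only [PySem.Dict.values, hitems]
  have hord : P.map Prod.fst = seenF [] word.toList := by
    simpa using firstPairs_fst word.toList 0 []
  have hkeysnd : first.keys.Nodup := by
    rw [hkeys, hord]; exact seenF_nodup word.toList [] (by simp)
  have hvpw : (P.map Prod.snd).Pairwise (fun a b => a < b) :=
    List.Pairwise.map Prod.snd (fun _ _ h => h) (firstPairs_pairwise word.toList 0 [])
  have hvnd : (P.map Prod.snd).Nodup := hvpw.imp (fun h => ne_of_lt h)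
  have horder : PySem.List.sorted first.values (fun x => x) false = P.map Prod.snd := by
    rw [hvalues]
    exact PySem.List.sorted_eq_self_of_pairwise _ _ (hvpw.imp (fun h => le_of_lt h))
  have hposfold : ∀ (xs : List (Int × Int)),
      xs.foldl wpPosStep PySem.Dict.empty
        = xs.foldl (fun d a => d.insert a.2 (a.1 + 1)) PySem.Dict.empty := fun xs => rfl
  have hpositems :
      ((PySem.List.enumerate (PySem.List.sorted first.values (fun x => x) false) 0).foldl wpPosStep
          PySem.Dict.empty).items
        = (PySem.List.enumerate (P.map Prod.snd) 0).map (fun p => (p.2, p.1 + 1)) := by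
    rw [horder, hposfold]
    rw [PySem.Dict.items_foldl_insert_fresh (PySem.List.enumerate (P.map Prod.snd) 0)
      (fun p => p.2) (fun p => p.1 + 1) PySem.Dict.empty (by intro a _; simp)
      (by rw [PySem.List.map_snd_enumerate]; exact hvnd)]
    rfl
  set pos := (PySem.List.enumerate (PySem.List.sorted first.values (fun x => x) false) 0).foldl
      wpPosStep PySem.Dict.empty with hpos
  have hposkeysnd : pos.keys.Nodup := by
    simp only [PySem.Dict.keys, hpositems]
    have hmm : ((PySem.List.enumerate (P.map Prod.snd) 0).map (fun p => (p.2, p.1 + 1))).map Prod.fst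
        = P.map Prod.snd := by
      rw [List.map_map]
      exact PySem.List.map_snd_enumerate _ _
    rw [hmm]
    exact hvnd
  have hchar : ∀ l ∈ word.toList,
      PySem.Int.toStr (pos.getD (first.getD l 0) 0)
        = PySem.Int.toStr (((PySem.List.index? (seenF [] word.toList) l).getD 0 : Int) + 1) := by
    intro l hl
    have hlmem : l ∈ P.map Prod.fst := by
      rw [hord, mem_seenF]; exact Or.inr hl
    obtain ⟨j, hj⟩ := Option.isSome_iff_exists.mp
      ((PySem.List.index?_isSome_iff (P.map Prod.fst) l).mpr hlmem)
    obtain ⟨hjlt, hgetj, -⟩ := PySem.List.getElem_of_index?_eq_some hj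
    have hjP : j < P.length := by simpa using hjlt
    have hPj : P[j] = (l, (P.map Prod.snd)[j]'(by simpa using hjP)) := by
      have h1 : P[j].1 = l := by
        have := hgetj; simpa [List.getElem_map] using this
      have h2 : P[j].2 = (P.map Prod.snd)[j]'(by simpa using hjP) := by
        simp [List.getElem_map]
      exact Prod.ext h1 h2
    have hmemP : (l, (P.map Prod.snd)[j]'(by simpa using hjP)) ∈ P := by
      rw [← hPj]; exact List.getElem_mem hjP
    have hfirstD : first.getD l 0 = (P.map Prod.snd)[j]'(by simpa using hjP) := by
      refine PySem.Dict.getD_of_mem_items first ?_ hkeysnd 0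
      rw [hitems]; exact hmemP
    have hjv : j < (P.map Prod.snd).length := by simpa using hjP
    have hmemE : ((0 : Int) + (j : Int), (P.map Prod.snd)[j]'hjv)
        ∈ PySem.List.enumerate (P.map Prod.snd) 0 := by
      rw [PySem.List.mem_enumerate_iff]
      exact ⟨j, hjv, rfl⟩
    have hmemPos : ((P.map Prod.snd)[j]'hjv, (0 : Int) + (j : Int) + 1) ∈ pos.items := by
      rw [hpositems]
      exact List.mem_map.mpr ⟨_, hmemE, rfl⟩
    have hposD : pos.getD ((P.map Prod.snd)[j]'hjv) 0 = (0 : Int) + (j : Int) + 1 :=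
      PySem.Dict.getD_of_mem_items pos hmemPos hposkeysnd 0
    rw [hfirstD, hposD, ← hord, hj]
    norm_num
  rw [PySem.Str.toList_join]
  have he : ("" : String).toList = [] := rfl
  rw [he, join_nil_eq_flatten, List.map_map]
  refine congrArg List.flatten (List.map_congr_left ?_)
  intro l hl
  simp only [Function.comp_apply]
  rw [hchar l hl, PySem.Int.toList_toStr]

lemma wp_toList (word : String) :
    (word_profile word).toList = (word_profile_alt word).toList := by
  rw [B_canon]
  simp only [word_profile]
  rw [String.toList_ofList]
  have := A_canon word.toList [] [] 1 (by simp) (by simp)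
  simpa using this

-- ===== VERDICT (by name: the statement is the Claim_ definition above) =====
theorem word_profile_spec : Claim_equal_word_profile := by
  intro word _
  exact String.toList_inj.mp (wp_toList word)
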